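-- pv_equiv track=rewrite | github.com/Davidcortes0/M2022 | Ej6.py | es_formidable
-- ===== SOURCE A (Python) =====
-- def es_formidable(string):
-- 	zero = string.split("1")[::-1]
-- 	len_zero = []
-- 	temp_zero = 0
-- 	flag_zero = True
--
-- 	one = string.split("0")
-- 	len_one = []
-- 	temp_one = 0
-- 	flag_one = True
--
-- 	for i in zero:
-- 		if len(i)>0:
-- 			if len(i)>temp_zero:
-- 				temp_zero = len(i)
-- 			else:
-- 				flag_zero = False
--
-- 	for i in one:
-- 		if len(i)>0:
-- 			if len(i)>temp_one:
-- 				temp_one = len(i)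
-- 			else:
-- 				flag_one = False
--
-- 	return flag_zero and flag_one
-- ===== SOURCE B (Python) =====
-- def es_formidable(string):
--     # One pass over the characters, tracking the current and previous maximal
--     # non-'1' run (for the zeros test) and non-'0' run (for the ones test):
--     # non-'1' run lengths must be strictly decreasing, non-'0' run lengths
--     # strictly increasing.
--     ok_zero = ok_one = True
--     run_zero = run_one = 0
--     prev_zero = prev_one = None
--     for c in string:
--         if c == '1':
--             if run_zero > 0:
--                 if prev_zero is not None and run_zero >= prev_zero:
--                     ok_zero = False
--                 prev_zero = run_zero
--                 run_zero = 0
--         else: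
--             run_zero += 1
--         if c == '0':
--             if run_one > 0:
--                 if prev_one is not None and run_one <= prev_one:
--                     ok_one = False
--                 prev_one = run_one
--                 run_one = 0
--         else:
--             run_one += 1
--     if run_zero > 0 and prev_zero is not None and run_zero >= prev_zero:
--         ok_zero = False
--     if run_one > 0 and prev_one is not None and run_one <= prev_one:
--         ok_one = False
--     return ok_zero and ok_one
-- ===== Notes on version B (the rewrite author's own statement) =====
-- stated objective: alternative
-- what changed: Replaces A's two split('1')/split('0') passes plus per-list max-tracking scans (with a reversed list for the zeros test) by a single left-to-right pass over the characters that maintains the current and previous non-'1' and non-'0' run lengths and checks strict decrease/increase on the fly.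
import Mathlib
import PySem

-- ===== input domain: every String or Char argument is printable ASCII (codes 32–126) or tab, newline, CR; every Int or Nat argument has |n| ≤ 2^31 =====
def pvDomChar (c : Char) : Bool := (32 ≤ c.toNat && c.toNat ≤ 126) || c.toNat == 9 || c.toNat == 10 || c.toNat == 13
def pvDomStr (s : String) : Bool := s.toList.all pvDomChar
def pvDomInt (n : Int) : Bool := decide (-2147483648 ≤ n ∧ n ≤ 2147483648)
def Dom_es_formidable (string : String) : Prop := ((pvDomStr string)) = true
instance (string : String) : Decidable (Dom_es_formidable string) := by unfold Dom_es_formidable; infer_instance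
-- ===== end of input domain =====

-- B replaces A's two split-then-scan passes by a single pass over the characters
-- that tracks the current and previous run lengths (objective: alternative, one pass).

-- ===== PORT A =====
-- A's loop body, shared shape for both loops: state (temp, flag)
def esfStepA (st : Nat × Bool) (i : List Char) : Nat × Bool :=
  if 0 < i.length then
    (if st.1 < i.length then (i.length, st.2) else (st.1, false))
  else st

def es_formidable (string : String) : Bool :=
  -- zero = string.split("1")[::-1]  ([::-1] via PySem.List.slice?; step -1 never fails)
  let zero : List (List Char) :=
    (PySem.List.slice? (PySem.Chars.splitOn string.toList ['1']) none none (-1)).getD []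
  -- one = string.split("0")
  let one : List (List Char) := PySem.Chars.splitOn string.toList ['0']
  let z := zero.foldl esfStepA (0, true)
  let o := one.foldl esfStepA (0, true)
  z.2 && o.2

-- ===== PORT B =====
-- B's loop body; state (ok_zero, run_zero, prev_zero, ok_one, run_one, prev_one)
def esfStepB (st : Bool × Nat × Option Nat × Bool × Nat × Option Nat) (c : Char) :
    Bool × Nat × Option Nat × Bool × Nat × Option Nat :=
  let (ok0, run0, prev0, ok1, run1, prev1) := st
  let (ok0, run0, prev0) :=
    if c = '1' then
      if 0 < run0 then
        ((if (match prev0 with | some p => decide (p ≤ run0) | none => false) then false else ok0),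
         0, some run0)
      else (ok0, run0, prev0)
    else (ok0, run0 + 1, prev0)
  let (ok1, run1, prev1) :=
    if c = '0' then
      if 0 < run1 then
        ((if (match prev1 with | some p => decide (run1 ≤ p) | none => false) then false else ok1),
         0, some run1)
      else (ok1, run1, prev1)
    else (ok1, run1 + 1, prev1)
  (ok0, run0, prev0, ok1, run1, prev1)

def es_formidable_alt (string : String) : Bool :=
  let (ok0, run0, prev0, ok1, run1, prev1) :=
    string.toList.foldl esfStepB (true, 0, none, true, 0, none)
  let ok0 :=
    if decide (0 < run0) && (match prev0 with | some p => decide (p ≤ run0) | none => false) then false else ok0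
  let ok1 :=
    if decide (0 < run1) && (match prev1 with | some p => decide (run1 ≤ p) | none => false) then false else ok1
  ok0 && ok1

-- ===== PRECONDITION & SPEC =====
def Spec_es_formidable (string : String) (out : Bool) : Prop := out = es_formidable_alt string
instance (string : String) (out : Bool) : Decidable (Spec_es_formidable string out) := by unfold Spec_es_formidable; infer_instance

-- ===== CLAIM (what is proved, stated in full; the proofs are below) =====
def Claim_equal_es_formidable : Prop := ∀ (string : String), Dom_es_formidable string → Spec_es_formidable string (es_formidable string)

-- ===== LEMMAS AND PROOFS =====

-- maximal non-sep run lengths of l, with `cur` the length of the run in progress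
def esfRuns (p : Char → Bool) (cur : Nat) : List Char → List Nat
  | [] => if 0 < cur then [cur] else []
  | c :: rest =>
      if p c then (if 0 < cur then cur :: esfRuns p 0 rest else esfRuns p 0 rest)
      else esfRuns p (cur + 1) rest

-- reference single-char split (esfSplit s cur l = python split of cur.reverse++l on s)
def esfSplit (s : Char) (cur : List Char) : List Char → List (List Char)
  | [] => [cur.reverse]
  | c :: rest => if c = s then cur.reverse :: esfSplit s [] rest else esfSplit s (c :: cur) rest

-- strictly-increasing-from-t check (A's fold, zero lengths filtered out separately)
def esfInc (t : Nat) : List Nat → Bool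
  | [] => true
  | n :: ns => decide (t < n) && esfInc n ns

-- strictly-decreasing chain with optional previous element (B's zeros test)
def esfDecFrom (prev : Option Nat) : List Nat → Bool
  | [] => true
  | n :: ns => (match prev with | some p => decide (n < p) | none => true) && esfDecFrom (some n) ns

-- strictly-increasing chain with optional previous element (B's ones test)
def esfIncFrom (prev : Option Nat) : List Nat → Bool
  | [] => true
  | n :: ns => (match prev with | some p => decide (p < n) | none => true) && esfIncFrom (some n) ns

theorem esfSplitOn_go_eq (s : Char) (l : List Char) : ∀ (fuel : Nat), l.length ≤ fuel →
    ∀ (cur : List Char) (acc : List (List Char)),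
    PySem.Chars.splitOn.go [s] fuel l cur acc = acc.reverse ++ esfSplit s cur l := by
  induction l with
  | nil =>
      intro fuel _ cur acc
      cases fuel <;> simp [PySem.Chars.splitOn.go, esfSplit]
  | cons c rest ih =>
      intro fuel hf cur acc
      cases fuel with
      | zero => simp at hf
      | succ f =>
          have hf' : rest.length ≤ f := by simpa using hf
          by_cases h : c = s
          · simp [PySem.Chars.splitOn.go, List.isPrefixOf, h, esfSplit,
              ih f hf' [] (cur.reverse :: acc)]
          · have hne : (s == c) = false := by
              simp only [beq_eq_false_iff_ne, ne_eq]; exact fun hh => h hh.symm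
            simp [PySem.Chars.splitOn.go, List.isPrefixOf, hne, esfSplit, h,
              ih f hf' (c :: cur) acc]

theorem esfSplitOn_eq (s : Char) (l : List Char) :
    PySem.Chars.splitOn l [s] = esfSplit s [] l := by
  have := esfSplitOn_go_eq s l (l.length + 1) (by omega) [] []
  simpa [PySem.Chars.splitOn] using this

theorem esfFoldA_eq (parts : List (List Char)) : ∀ (t : Nat) (f : Bool),
    (parts.foldl esfStepA (t, f)).2
      = (f && esfInc t ((parts.map List.length).filter (fun n => decide (0 < n)))) := by
  induction parts with
  | nil => intro t f; simp [esfInc]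
  | cons i is ih =>
      intro t f
      by_cases h0 : 0 < i.length
      · by_cases ht : t < i.length
        · simp [esfStepA, h0, ht, ih, esfInc]
        · simp [esfStepA, h0, ht, ih, esfInc]
      · simp [esfStepA, h0, ih]

theorem esfSplit_lengths (s : Char) (l : List Char) : ∀ (cur : List Char),
    ((esfSplit s cur l).map List.length).filter (fun n => decide (0 < n))
      = esfRuns (fun c => c = s) cur.length l := by
  induction l with
  | nil =>
      intro cur
      by_cases hc : 0 < cur.length <;> simp [esfSplit, esfRuns, hc]
  | cons c rest ih =>
      intro cur
      by_cases h : c = s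
      · by_cases hc : 0 < cur.length <;>
          simp [esfSplit, esfRuns, h, hc, ih]
      · simpa [esfSplit, esfRuns, h] using ih (c :: cur)

theorem esfRuns_pos (p : Char → Bool) (l : List Char) :
    ∀ (cur : Nat), ∀ n ∈ esfRuns p cur l, 0 < n := by
  induction l with
  | nil =>
      intro cur n hn
      by_cases hc : 0 < cur <;> simp [esfRuns, hc] at hn
      omega
  | cons c rest ih =>
      intro cur n hn
      by_cases hp : p c
      · by_cases hc : 0 < cur
        · simp [esfRuns, hp, hc] at hn
          rcases hn with h | h
          · omega
          · exact ih 0 n h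
        · simp [esfRuns, hp, hc] at hn
          exact ih 0 n hn
      · simp [esfRuns, hp] at hn
        exact ih (cur + 1) n hn

theorem esfInc_iff (ys : List Nat) : ∀ t, esfInc t ys = true ↔ List.IsChain (· < ·) (t :: ys) := by
  induction ys with
  | nil => intro t; simp [esfInc]
  | cons n ns ih => intro t; simp [esfInc, List.isChain_cons_cons, ih]

theorem esfIncFrom_some (ys : List Nat) : ∀ p, esfIncFrom (some p) ys = esfInc p ys := by
  induction ys with
  | nil => intro p; rfl
  | cons n ns ih => intro p; simp [esfIncFrom, esfInc, ih]

theorem esfDecFrom_some_iff (ys : List Nat) :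
    ∀ p, esfDecFrom (some p) ys = true ↔ List.IsChain (· > ·) (p :: ys) := by
  induction ys with
  | nil => intro p; simp [esfDecFrom]
  | cons n ns ih => intro p; simp [esfDecFrom, List.isChain_cons_cons, ih]

theorem esfDecFrom_none_iff (ys : List Nat) :
    esfDecFrom none ys = true ↔ List.IsChain (· > ·) ys := by
  cases ys with
  | nil => simp [esfDecFrom]
  | cons n ns => simpa [esfDecFrom] using esfDecFrom_some_iff ns n

theorem esfInc_rev_eq_dec (ys : List Nat) (hpos : ∀ n ∈ ys, 0 < n) :
    esfInc 0 ys.reverse = esfDecFrom none ys := by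
  rw [Bool.eq_iff_iff, esfInc_iff, esfDecFrom_none_iff]
  have hrev : List.IsChain (· < ·) ys.reverse ↔ List.IsChain (· > ·) ys := by
    simpa [flip] using List.isChain_reverse (R := (· < ·)) (l := ys)
  constructor
  · intro hch
    exact hrev.mp hch.tail
  · intro hch
    have h1 : List.IsChain (· < ·) ys.reverse := hrev.mpr hch
    cases hr : ys.reverse with
    | nil => simp
    | cons m ms =>
        rw [hr] at h1
        refine List.isChain_cons_cons.mpr ⟨?_, h1⟩
        refine hpos m ?_
        have hm : m ∈ ys.reverse := by simp [hr]
        simpa using hm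

theorem esfInc_eq_incFrom (ys : List Nat) (hpos : ∀ n ∈ ys, 0 < n) :
    esfInc 0 ys = esfIncFrom none ys := by
  cases ys with
  | nil => rfl
  | cons n ns =>
      have hn : 0 < n := hpos n (by simp)
      simp [esfInc, esfIncFrom, hn, esfIncFrom_some]

-- B's fold state (zero side only / one side only)
def esfZStep (st : Bool × Nat × Option Nat) (c : Char) : Bool × Nat × Option Nat :=
  if c = '1' then
    if 0 < st.2.1 then
      ((if (match st.2.2 with | some p => decide (p ≤ st.2.1) | none => false) then false else st.1),
        0, some st.2.1)
    else st
  else (st.1, st.2.1 + 1, st.2.2)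

def esfOStep (st : Bool × Nat × Option Nat) (c : Char) : Bool × Nat × Option Nat :=
  if c = '0' then
    if 0 < st.2.1 then
      ((if (match st.2.2 with | some p => decide (st.2.1 ≤ p) | none => false) then false else st.1),
        0, some st.2.1)
    else st
  else (st.1, st.2.1 + 1, st.2.2)

def esfFinZ (st : Bool × Nat × Option Nat) : Bool :=
  st.1 && !(decide (0 < st.2.1) && (match st.2.2 with | some p => decide (p ≤ st.2.1) | none => false))

def esfFinO (st : Bool × Nat × Option Nat) : Bool :=
  st.1 && !(decide (0 < st.2.1) && (match st.2.2 with | some p => decide (st.2.1 ≤ p) | none => false))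

theorem esfStepB_eq (a : Bool) (b : Nat) (pr : Option Nat) (d : Bool) (e : Nat)
    (po : Option Nat) (c : Char) :
    esfStepB (a, b, pr, d, e, po) c
      = ((esfZStep (a, b, pr) c).1, (esfZStep (a, b, pr) c).2.1, (esfZStep (a, b, pr) c).2.2,
         (esfOStep (d, e, po) c).1, (esfOStep (d, e, po) c).2.1, (esfOStep (d, e, po) c).2.2) := by
  simp only [esfStepB, esfZStep, esfOStep]

theorem esfFoldB_split (l : List Char) : ∀ (z o : Bool × Nat × Option Nat),
    l.foldl esfStepB (z.1, z.2.1, z.2.2, o.1, o.2.1, o.2.2) =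
      ((l.foldl esfZStep z).1, (l.foldl esfZStep z).2.1, (l.foldl esfZStep z).2.2,
       (l.foldl esfOStep o).1, (l.foldl esfOStep o).2.1, (l.foldl esfOStep o).2.2) := by
  induction l with
  | nil => intro z o; rfl
  | cons c rest ih =>
      intro z o
      obtain ⟨a, b, pr⟩ := z
      obtain ⟨d, e, po⟩ := o
      simp only [List.foldl_cons, esfStepB_eq]
      exact ih (esfZStep (a, b, pr) c) (esfOStep (d, e, po) c)

theorem esfZInv (l : List Char) : ∀ (ok : Bool) (run : Nat) (prev : Option Nat),
    esfFinZ (l.foldl esfZStep (ok, run, prev))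
      = (ok && esfDecFrom prev (esfRuns (fun c => c = '1') run l)) := by
  induction l with
  | nil =>
      intro ok run prev
      cases prev with
      | none => by_cases hr : 0 < run <;> simp [esfFinZ, esfRuns, esfDecFrom, hr]
      | some p =>
          by_cases hr : 0 < run
          · by_cases hp : p ≤ run
            · simp [esfFinZ, esfRuns, esfDecFrom, hr, hp, Nat.not_lt.mpr hp]
            · simp [esfFinZ, esfRuns, esfDecFrom, hr, hp, Nat.lt_of_not_le hp]
          · simp [esfFinZ, esfRuns, esfDecFrom, hr]
  | cons c rest ih =>
      intro ok run prev
      by_cases hc : c = '1'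
      · by_cases hr : 0 < run
        · cases prev with
          | none => simp [esfZStep, hc, hr, esfRuns, esfDecFrom, ih]
          | some p =>
              by_cases hp : p ≤ run
              · simp [esfZStep, hc, hr, hp, esfRuns, esfDecFrom, ih, Nat.not_lt.mpr hp]
              · simp [esfZStep, hc, hr, hp, esfRuns, esfDecFrom, ih, Nat.lt_of_not_le hp]
        · simp [esfZStep, hc, esfRuns, ih, Nat.eq_zero_of_not_pos hr]
      · simp [esfZStep, hc, esfRuns, ih]

theorem esfOInv (l : List Char) : ∀ (ok : Bool) (run : Nat) (prev : Option Nat),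
    esfFinO (l.foldl esfOStep (ok, run, prev))
      = (ok && esfIncFrom prev (esfRuns (fun c => c = '0') run l)) := by
  induction l with
  | nil =>
      intro ok run prev
      cases prev with
      | none => by_cases hr : 0 < run <;> simp [esfFinO, esfRuns, esfIncFrom, hr]
      | some p =>
          by_cases hr : 0 < run
          · by_cases hp : run ≤ p
            · simp [esfFinO, esfRuns, esfIncFrom, hr, hp, Nat.not_lt.mpr hp]
            · simp [esfFinO, esfRuns, esfIncFrom, hr, hp, Nat.lt_of_not_le hp]
          · simp [esfFinO, esfRuns, esfIncFrom, hr]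
  | cons c rest ih =>
      intro ok run prev
      by_cases hc : c = '0'
      · by_cases hr : 0 < run
        · cases prev with
          | none => simp [esfOStep, hc, hr, esfRuns, esfIncFrom, ih]
          | some p =>
              by_cases hp : run ≤ p
              · simp [esfOStep, hc, hr, hp, esfRuns, esfIncFrom, ih, Nat.not_lt.mpr hp]
              · simp [esfOStep, hc, hr, hp, esfRuns, esfIncFrom, ih, Nat.lt_of_not_le hp]
        · simp [esfOStep, hc, esfRuns, ih, Nat.eq_zero_of_not_pos hr]
      · simp [esfOStep, hc, esfRuns, ih]

theorem esfIfFalse (b x : Bool) : (if b = true then false else x) = (x && !b) := by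
  cases b <;> cases x <;> rfl

theorem esfA_char (s : String) :
    es_formidable s
      = (esfDecFrom none (esfRuns (fun c => c = '1') 0 s.toList)
          && esfIncFrom none (esfRuns (fun c => c = '0') 0 s.toList)) := by
  have h1 := esfFoldA_eq ((esfSplit '1' [] s.toList).reverse) 0 true
  have h2 := esfFoldA_eq (esfSplit '0' [] s.toList) 0 true
  simp only [es_formidable, PySem.List.slice?_none_none_neg_one, Option.getD_some,
    esfSplitOn_eq, h1, h2, Bool.true_and]
  rw [List.map_reverse, List.filter_reverse, esfSplit_lengths, esfSplit_lengths]
  simp only [List.length_nil]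
  rw [esfInc_rev_eq_dec _ (esfRuns_pos _ _ 0), esfInc_eq_incFrom _ (esfRuns_pos _ _ 0)]

theorem esfB_char (s : String) :
    es_formidable_alt s
      = (esfDecFrom none (esfRuns (fun c => c = '1') 0 s.toList)
          && esfIncFrom none (esfRuns (fun c => c = '0') 0 s.toList)) := by
  have hs := esfFoldB_split s.toList (true, 0, none) (true, 0, none)
  have hz := esfZInv s.toList true 0 none
  have ho := esfOInv s.toList true 0 none
  simp only [esfFinZ, esfFinO] at hz ho
  simp only [es_formidable_alt, hs, esfIfFalse]
  rw [hz, ho]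
  simp

-- ===== VERDICT (by name: the statement is the Claim_ definition above) =====
theorem es_formidable_spec : Claim_equal_es_formidable := by
  intro string _
  unfold Spec_es_formidable
  rw [esfA_char, esfB_char]
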